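-- pv_equiv track=rewrite | github.com/katsil/RTSB | weather.py | createArray3
-- ===== SOURCE A (Python) =====
-- def createArray3(arr):
--   keyBoard = []
--   temp = []
--   i=1
--   for city in arr.keys():
--     temp.append(city)
--     if i%3==0:
--       keyBoard.append(temp)
--       temp = []
--     i+=1
--   if i%3!=1:
--     keyBoard.append(temp)
--   return keyBoard
-- ===== SOURCE B (Python) =====
-- def createArray3(arr):
--   keys = list(arr.keys())
--   return [keys[i:i+3] for i in range(0, len(keys), 3)]
-- ===== Notes on version B (the rewrite author's own statement) =====
-- stated objective: simpler
-- what changed: Replaces the element-at-a-time accumulation with a modulo-3 counter, temp buffer and trailing flush by a single stride-slicing comprehension that cuts fixed-size chunks directly.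
import Mathlib
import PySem

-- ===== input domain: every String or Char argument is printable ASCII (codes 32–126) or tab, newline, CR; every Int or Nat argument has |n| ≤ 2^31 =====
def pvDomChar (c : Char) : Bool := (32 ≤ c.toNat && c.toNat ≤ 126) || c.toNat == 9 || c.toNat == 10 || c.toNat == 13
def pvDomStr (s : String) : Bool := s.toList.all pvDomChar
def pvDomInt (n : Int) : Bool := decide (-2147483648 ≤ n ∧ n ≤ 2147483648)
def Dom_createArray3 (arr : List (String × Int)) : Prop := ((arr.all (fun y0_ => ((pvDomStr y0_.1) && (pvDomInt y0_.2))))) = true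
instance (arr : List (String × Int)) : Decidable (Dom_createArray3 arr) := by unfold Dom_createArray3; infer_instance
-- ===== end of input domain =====

-- B groups the dict keys by stride-slicing instead of A's per-element accumulation
-- with a modulo-3 counter and trailing flush (objective: simpler). Same return value.

-- ===== PORT A =====
-- the for-loop over arr.keys(): state = (keyBoard, temp, i); Python dict keys = first-occurrence dedup of the pairs' first components
def createArray3Loop : List String → List (List String) → List String → Int → List (List String)
  | [], keyBoard, temp, i =>
      if PySem.Int.mod i 3 ≠ 1 then keyBoard ++ [temp] else keyBoard
  | city :: rest, keyBoard, temp, i =>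
      let temp' := temp ++ [city]
      if PySem.Int.mod i 3 = 0 then createArray3Loop rest (keyBoard ++ [temp']) [] (i + 1)
      else createArray3Loop rest keyBoard temp' (i + 1)

def createArray3 (arr : List (String × Int)) : List (List String) :=
  createArray3Loop (PySem.List.dedup (arr.map Prod.fst)) [] [] 1

-- ===== PORT B =====
def createArray3_alt (arr : List (String × Int)) : List (List String) :=
  let keys := PySem.List.dedup (arr.map Prod.fst)
  (PySem.List.pyRange 0 (keys.length : Int) 3).map
    (fun i => PySem.List.slice keys (some i) (some (i + 3)))

-- ===== PRECONDITION & SPEC =====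
def Spec_createArray3 (arr : List (String × Int)) (out : List (List String)) : Prop := out = createArray3_alt arr
instance (arr : List (String × Int)) (out : List (List String)) : Decidable (Spec_createArray3 arr out) := by unfold Spec_createArray3; infer_instance

-- ===== CLAIM (what is proved, stated in full; the proofs are below) =====
def Claim_equal_createArray3 : Prop := ∀ (arr : List (String × Int)), Dom_createArray3 arr → Spec_createArray3 arr (createArray3 arr)

-- ===== LEMMAS AND PROOFS =====

-- reference chunking: successive groups of three
def chunk3 : List String → List (List String)
  | [] => []
  | [a] => [[a]]
  | [a, b] => [[a, b]]
  | a :: b :: c :: rest => [a, b, c] :: chunk3 rest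

theorem chunk3_eq (l : List String) (h : l ≠ []) :
    chunk3 l = l.take 3 :: chunk3 (l.drop 3) := by
  match l with
  | [] => exact absurd rfl h
  | [a] => simp [chunk3]
  | [a, b] => simp [chunk3]
  | a :: b :: c :: rest => simp [chunk3]

theorem mod3_cast (m : Nat) : PySem.Int.mod ((m : Nat) : Int) 3 = ((m % 3 : Nat) : Int) := by
  exact_mod_cast PySem.Int.mod_natCast m 3

theorem A_eq (keys : List String) :
    ∀ (kb : List (List String)) (temp : List String) (n : Nat), temp.length = n % 3 →
      createArray3Loop keys kb temp ((n : Int) + 1) = kb ++ chunk3 (temp ++ keys) := by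
  induction keys with
  | nil =>
    intro kb temp n h
    have hcast : ((n : Int) + 1) = ((n + 1 : Nat) : Int) := by push_cast; ring
    rw [createArray3Loop, hcast, mod3_cast, List.append_nil]
    by_cases htemp : temp = []
    · subst htemp
      simp only [List.length_nil] at h
      have h1 : (n + 1) % 3 = 1 := by omega
      simp [h1, chunk3]
    · have hlen : temp.length ≠ 0 := by simpa using htemp
      have hlt : temp.length < 3 := by omega
      have hne : (((n + 1) % 3 : Nat) : Int) ≠ 1 := by
        have : (n + 1) % 3 ≠ 1 := by omega
        exact_mod_cast this
      rw [if_pos hne, chunk3_eq temp htemp,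
          List.take_of_length_le (Nat.le_of_lt hlt),
          List.drop_eq_nil_of_le (Nat.le_of_lt hlt)]
      simp [chunk3]
  | cons c rest ih =>
    intro kb temp n h
    have hcast : ((n : Int) + 1) = ((n + 1 : Nat) : Int) := by push_cast; ring
    have hlt : temp.length < 3 := by omega
    rw [createArray3Loop, hcast, mod3_cast]
    by_cases h2 : temp.length = 2
    · have h0 : (n + 1) % 3 = 0 := by omega
      rw [if_pos (by exact_mod_cast h0)]
      have hrec := ih (kb ++ [temp ++ [c]]) [] (n + 1) (by simp [h0])
      simp only [List.nil_append] at hrec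
      rw [hrec, chunk3_eq (temp ++ c :: rest) (by simp)]
      have htake : (temp ++ c :: rest).take 3 = temp ++ [c] := by
        rw [List.take_append, List.take_of_length_le (by omega)]
        simp [h2]
      have hdrop : (temp ++ c :: rest).drop 3 = rest := by
        rw [List.drop_append, List.drop_eq_nil_of_le (by omega)]
        simp [h2]
      rw [htake, hdrop]
      simp
    · have hne : (((n + 1) % 3 : Nat) : Int) ≠ 0 := by
        have : (n + 1) % 3 ≠ 0 := by omega
        exact_mod_cast this
      rw [if_neg hne]
      have hrec := ih kb (temp ++ [c]) (n + 1) (by simp; omega)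
      rw [hrec]
      simp

theorem chunk_eq (keys : List String) :
    (List.range ((keys.length + 2) / 3)).map (fun k => (keys.drop (3 * k)).take 3) = chunk3 keys := by
  match keys with
  | [] => simp [chunk3]
  | a :: rest =>
    have hT : ((a :: rest).length + 2) / 3 = (((a :: rest).drop 3).length + 2) / 3 + 1 := by
      simp only [List.length_cons, List.length_drop]
      omega
    rw [chunk3_eq (a :: rest) (by simp), ← chunk_eq ((a :: rest).drop 3),
        hT, List.range_succ_eq_map, List.map_cons, List.map_map]
    refine congrArg₂ List.cons (by simp) ?_
    apply List.map_congr_left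
    intro k _
    simp only [Function.comp_apply, List.drop_drop]
    congr 2
    omega
termination_by keys.length
decreasing_by simp

theorem B_eq (keys : List String) :
    (PySem.List.pyRange 0 (keys.length : Int) 3).map
      (fun i => PySem.List.slice keys (some i) (some (i + 3))) = chunk3 keys := by
  rw [PySem.List.pyRange_of_pos 0 (keys.length : Int) (by norm_num)]
  have hcnt : (if (0 : Int) < (keys.length : Int) then
      (((keys.length : Int) - 0 + 3 - 1) / 3).toNat else 0) = (keys.length + 2) / 3 := by
    split_ifs with h
    · omega
    · omega
  rw [hcnt, List.map_map, ← chunk_eq keys]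
  apply List.map_congr_left
  intro k _
  simp only [Function.comp_apply]
  have h1 : (0 : Int) + 3 * (k : Int) = ((3 * k : Nat) : Int) := by push_cast; ring
  rw [h1]
  have h2 : ((3 * k : Nat) : Int) + 3 = ((3 * k + 3 : Nat) : Int) := by push_cast; ring
  rw [h2, PySem.List.slice_natCast]
  congr 1
  omega

-- ===== VERDICT (by name: the statement is the Claim_ definition above) =====
theorem createArray3_spec : Claim_equal_createArray3 := by
  intro arr _
  unfold Spec_createArray3 createArray3 createArray3_alt
  have hA := A_eq (PySem.List.dedup (arr.map Prod.fst)) [] [] 0 (by simp)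
  simp only [Nat.cast_zero, zero_add, List.nil_append] at hA
  rw [hA, B_eq]
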